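-- pv_equiv track=rewrite | github.com/muttlake/RadonProjectFinal | BackprojectRadon.py | findMaxHistValue
-- ===== SOURCE A (Python) =====
-- def findMaxHistValue(hist):
--     """Get minimum nonempty histogram value for image."""
--     maxValue = -1
--     i = len(hist) - 1
--     foundNonEmptyValue = False
--     while i >= 0 and not foundNonEmptyValue:
--         if hist[i] > 0:
--             maxValue = i
--             foundNonEmptyValue = True
--         i = i - 1
--     return maxValue
-- ===== SOURCE B (Python) =====
-- def findMaxHistValue(hist):
--     """Get minimum nonempty histogram value for image."""
--     return max((i for i, v in enumerate(hist) if v > 0), default=-1)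
-- ===== Notes on version B (the rewrite author's own statement) =====
-- stated objective: idiomatic
-- what changed: Replaced the backward early-exit while loop with index bookkeeping by a single forward filter-and-reduce: max of all indices with positive value, default -1.
import Mathlib
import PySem

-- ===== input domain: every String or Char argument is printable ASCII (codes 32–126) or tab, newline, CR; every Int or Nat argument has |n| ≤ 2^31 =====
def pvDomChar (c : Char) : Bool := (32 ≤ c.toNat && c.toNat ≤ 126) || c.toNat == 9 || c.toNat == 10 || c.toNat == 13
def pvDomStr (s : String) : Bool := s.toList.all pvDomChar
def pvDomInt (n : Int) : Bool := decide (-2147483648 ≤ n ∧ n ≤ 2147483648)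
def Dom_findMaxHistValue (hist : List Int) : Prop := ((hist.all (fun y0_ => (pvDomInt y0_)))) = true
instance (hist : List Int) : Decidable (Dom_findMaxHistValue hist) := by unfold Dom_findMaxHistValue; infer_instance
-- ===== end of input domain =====

-- B replaces A's backward early-exit scan by a forward filter-and-reduce (max with default -1); same O(n) cost, more idiomatic.

-- ===== PORT A =====
-- A's while loop counts i down from len-1 and stops at the first positive entry;
-- ported as structural recursion on the count i+1 (index i = n is always in range, so getD is exact for hist[i]).
def findMaxHistValueLoop (hist : List Int) : Nat → Int
  | 0 => -1
  | n + 1 => if hist.getD n 0 > 0 then (n : Int) else findMaxHistValueLoop hist n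

def findMaxHistValue (hist : List Int) : Int :=
  findMaxHistValueLoop hist hist.length

-- ===== PORT B =====
-- max((i for i, v in enumerate(hist) if v > 0), default=-1)
def findMaxHistValue_alt (hist : List Int) : Int :=
  ((((PySem.List.enumerate hist 0).filter (fun p => decide (p.2 > 0))).map (·.1)).foldl max (-1))

-- ===== PRECONDITION & SPEC =====
def Spec_findMaxHistValue (hist : List Int) (out : Int) : Prop := out = findMaxHistValue_alt hist
instance (hist : List Int) (out : Int) : Decidable (Spec_findMaxHistValue hist out) := by unfold Spec_findMaxHistValue; infer_instance

-- ===== CLAIM (what is proved, stated in full; the proofs are below) =====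
def Claim_equal_findMaxHistValue : Prop := ∀ (hist : List Int), Dom_findMaxHistValue hist → Spec_findMaxHistValue hist (findMaxHistValue hist)

-- ===== LEMMAS AND PROOFS =====

-- the elements of the backward scan's prefix are unaffected by appending
theorem findMaxHistValueLoop_append (hist : List Int) (x : Int) :
    ∀ n, n ≤ hist.length → findMaxHistValueLoop (hist ++ [x]) n = findMaxHistValueLoop hist n := by
  intro n
  induction n with
  | zero => intro _; rfl
  | succ m ih =>
      intro h
      have hm : m < hist.length := Nat.lt_of_succ_le h
      simp only [findMaxHistValueLoop, List.getD_append _ _ _ _ hm, ih (Nat.le_of_lt hm)]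

theorem alt_indices_lt (hist : List Int) :
    ∀ y ∈ (((PySem.List.enumerate hist 0).filter (fun p => decide (p.2 > 0))).map (·.1)),
      y < (hist.length : Int) := by
  intro y hy
  rcases List.mem_map.mp hy with ⟨p, hp, rfl⟩
  have hpe : p ∈ PySem.List.enumerate hist 0 := List.mem_of_mem_filter hp
  rcases (PySem.List.mem_enumerate_iff _ _ _).mp hpe with ⟨k, hk, rfl⟩
  simpa using (Int.ofNat_lt.mpr hk)

theorem foldl_max_lt (m : Int) : ∀ (l : List Int) (a : Int),
    a < m → (∀ y ∈ l, y < m) → l.foldl max a < m := by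
  intro l
  induction l with
  | nil => intro a ha _; exact ha
  | cons y t ih =>
      intro a ha hl
      have hy : y < m := hl y (List.mem_cons_self ..)
      exact ih (max a y) (max_lt ha hy) (fun z hz => hl z (List.mem_cons_of_mem _ hz))

theorem main_eq (hist : List Int) : findMaxHistValue hist = findMaxHistValue_alt hist := by
  induction hist using List.reverseRecOn with
  | nil => rfl
  | append_singleton t x ih =>
      have hlen : (t ++ [x]).length = t.length + 1 := by simp
      have hget : (t ++ [x]).getD t.length 0 = x := by simp
      by_cases hx : x > 0
      · have hbound : ((((PySem.List.enumerate t 0).filter (fun p => decide (p.2 > 0))).map (·.1)).foldl max (-1)) < (t.length : Int) := by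
          refine foldl_max_lt _ _ _ (by omega) (alt_indices_lt t)
        simp only [findMaxHistValue, findMaxHistValue_alt, hlen, findMaxHistValueLoop, hget,
          PySem.List.enumerate_append, List.filter_append, List.map_append, List.foldl_append,
          PySem.List.enumerate_cons, PySem.List.enumerate_nil] at *
        simp [hx, max_eq_right (le_of_lt hbound)]
      · simp only [findMaxHistValue, findMaxHistValue_alt, hlen, findMaxHistValueLoop, hget,
          PySem.List.enumerate_append, List.filter_append, List.map_append, List.foldl_append,
          PySem.List.enumerate_cons, PySem.List.enumerate_nil] at *
        simp [hx, findMaxHistValueLoop_append t x t.length (le_refl _), ih]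

-- ===== VERDICT (by name: the statement is the Claim_ definition above) =====
theorem findMaxHistValue_spec : Claim_equal_findMaxHistValue := by
  intro hist _
  exact main_eq hist
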